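-- pv_equiv track=rewrite | github.com/wesleyd/aoc15 | day01b.py | first_basement
-- ===== SOURCE A (Python) =====
-- def first_basement(parens: str) -> int:
--     n = 0
--     for i, c in enumerate(parens):
--         if c == '(':
--             n += 1
--         elif c == ')':
--             n -= 1
--         if n < 0:
--             return i+1
-- ===== SOURCE B (Python) =====
-- def first_basement(parens: str) -> int:
--     # Pre_ excludes inputs whose balance never goes negative: there A returns
--     # None (not an int); B falls through to None as well.
--     deltas = [1 if c == '(' else (-1 if c == ')' else 0) for c in parens]
--     sums = []
--     t = 0
--     for d in deltas:
--         t += d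
--         sums.append(t)
--     for i, s in enumerate(sums):
--         if s < 0:
--             return i + 1
-- ===== Notes on version B (the rewrite author's own statement) =====
-- stated objective: alternative
-- what changed: A's single fused loop (counter updated and tested per character) is split into two passes: build the prefix-balance table as a list, then scan that table for the first negative entry.
-- outside the precondition, e.g. on first_basement('()'): A returns None, B returns None
import Mathlib
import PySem

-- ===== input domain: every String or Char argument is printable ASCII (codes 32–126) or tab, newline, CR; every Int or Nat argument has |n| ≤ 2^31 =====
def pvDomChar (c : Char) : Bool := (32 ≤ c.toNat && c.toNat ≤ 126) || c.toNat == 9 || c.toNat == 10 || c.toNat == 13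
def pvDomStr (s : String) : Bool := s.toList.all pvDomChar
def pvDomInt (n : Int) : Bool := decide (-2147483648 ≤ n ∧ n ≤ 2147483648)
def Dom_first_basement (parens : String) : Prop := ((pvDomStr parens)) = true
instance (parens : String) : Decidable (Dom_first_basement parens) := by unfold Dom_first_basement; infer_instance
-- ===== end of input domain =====

-- B builds the prefix-balance table first, then scans it; A fuses counter update and test in one loop.
-- On inputs whose balance never goes negative Python A returns None (no int); those are outside Pre_.

-- ===== PORT A =====
-- A's fused loop: counter n, index i, early return i+1 when n < 0; falls through to None.
def pvALoop : List Char → Int → Int → Option Int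
  | [], _, _ => none
  | c :: cs, n, i =>
    let n' := if c = '(' then n + 1 else if c = ')' then n - 1 else n
    if n' < 0 then some (i + 1) else pvALoop cs n' (i + 1)

def first_basement (parens : String) : Int :=
  (pvALoop parens.toList 0 0).getD 0   -- getD 0 unreachable under Pre_ (Python returns None there)

-- ===== PORT B =====
def pvDeltas (cs : List Char) : List Int :=
  cs.map (fun c => if c = '(' then 1 else if c = ')' then -1 else 0)

-- running prefix sums materialized into a list
def pvPsums : List Int → Int → List Int
  | [], _ => []
  | d :: ds, t => (t + d) :: pvPsums ds (t + d)

-- scan the table for the first negative entry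
def pvBScan : List Int → Int → Option Int
  | [], _ => none
  | s :: ss, i => if s < 0 then some (i + 1) else pvBScan ss (i + 1)

def first_basement_alt (parens : String) : Int :=
  (pvBScan (pvPsums (pvDeltas parens.toList) 0) 0).getD 0

-- ===== PRECONDITION & SPEC =====
-- Pre_ excludes exactly the inputs whose running balance never goes negative: there Python A
-- returns None, which is not a value of the declared int type (B does the same in Python).
def Pre_first_basement (parens : String) : Prop :=
  ∃ i, i < parens.toList.length + 1 ∧
    (parens.toList.take i).count '(' < (parens.toList.take i).count ')'
instance (parens : String) : Decidable (Pre_first_basement parens) := by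
  unfold Pre_first_basement; infer_instance

def pvWitness_first_basement : String := ")"

def Spec_first_basement (parens : String) (out : Int) : Prop := out = first_basement_alt parens
instance (parens : String) (out : Int) : Decidable (Spec_first_basement parens out) := by
  unfold Spec_first_basement; infer_instance

-- ===== CLAIM (what is proved, stated in full; the proofs are below) =====
def Claim_equal_first_basement : Prop :=
  ∀ (parens : String), Dom_first_basement parens → Pre_first_basement parens →
    Spec_first_basement parens (first_basement parens)

-- ===== LEMMAS AND PROOFS =====
-- A's fused loop equals B's two-pass pipeline, for every start counter n and index i.
theorem pvALoop_eq_bScan (cs : List Char) (n i : Int) :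
    pvALoop cs n i = pvBScan (pvPsums (pvDeltas cs) n) i := by
  induction cs generalizing n i with
  | nil => rfl
  | cons c cs ih =>
    simp only [pvALoop, pvDeltas, List.map, pvPsums, pvBScan]
    by_cases h1 : c = '('
    · simp [h1, ih, pvDeltas]
    · by_cases h2 : c = ')'
      · simp [h2, ih, pvDeltas, sub_eq_add_neg]
      · simp [h1, h2, ih, pvDeltas]

-- ===== VERDICT (by name: the statement is the Claim_ definition above) =====
theorem first_basement_spec : Claim_equal_first_basement := by
  intro parens _ _
  unfold Spec_first_basement first_basement first_basement_alt
  rw [pvALoop_eq_bScan]
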